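-- pv_equiv track=rewrite | github.com/EDG017/tasks_and_tests | task.py | conv_endian
-- ===== SOURCE A (Python) =====
-- HEX_MAP_TO_STR = {
--     0: "0",
--     1: "1",
--     2: "2",
--     3: "3",
--     4: "4",
--     5: "5",
--     6: "6",
--     7: "7",
--     8: "8",
--     9: "9",
--     10: "A",
--     11: "B",
--     12: "C",
--     13: "D",
--     14: "E",
--     15: "F",
-- }
--
-- def conv_endian(num, endian='big'):
--     """takes in an integer value as num and an optional string as endian type
--      and converts the integer to a hexadecimal number"""
--
--     res = ["##"]
--     abs_num = abs(num)
--
--     while abs_num > 0: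
--         remainder = abs_num % 16
--         abs_num = abs_num // 16
--
--         if res[0][1] == "#":
--             res[0] = "#" + HEX_MAP_TO_STR[remainder]
--         elif res[0][0] == "#":
--             res[0] = HEX_MAP_TO_STR[remainder] + res[0][1]
--         else:
--             res.insert(0, "##")
--             res[0] = "#" + HEX_MAP_TO_STR[remainder]
--
--     if res[0][0] == "#":
--         res[0] = "0" + res[0][1]
--
--     if endian != "big" and endian != "little":
--         return None
--
--     if endian == "little":
--         res.reverse()
--
--     res = " ".join(res)
--
--     if num < 0:
--         res = "-" + res
--
--     if num == 0:
--         return "00"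
--
--     return res
-- ===== SOURCE B (Python) =====
-- def conv_endian(num, endian='big'):
--     if endian != 'big' and endian != 'little':
--         return None
--     if num == 0:
--         return "00"
--     h = format(abs(num), 'X')
--     if len(h) % 2:
--         h = '0' + h
--     groups = [h[i:i + 2] for i in range(0, len(h), 2)]
--     if endian == 'little':
--         groups.reverse()
--     s = ' '.join(groups)
--     return '-' + s if num < 0 else s
-- ===== Notes on version B (the rewrite author's own statement) =====
-- stated objective: simpler
-- what changed: Replaces A's stateful '#'-placeholder cell machine (building 2-char cells LSB-first with three mutation branches plus a post-pass fixing a leftover '#') by: take the full uppercase hex string, left-pad to even length, and chunk it into 2-character groups, reversing the group list for little-endian.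
import Mathlib
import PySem

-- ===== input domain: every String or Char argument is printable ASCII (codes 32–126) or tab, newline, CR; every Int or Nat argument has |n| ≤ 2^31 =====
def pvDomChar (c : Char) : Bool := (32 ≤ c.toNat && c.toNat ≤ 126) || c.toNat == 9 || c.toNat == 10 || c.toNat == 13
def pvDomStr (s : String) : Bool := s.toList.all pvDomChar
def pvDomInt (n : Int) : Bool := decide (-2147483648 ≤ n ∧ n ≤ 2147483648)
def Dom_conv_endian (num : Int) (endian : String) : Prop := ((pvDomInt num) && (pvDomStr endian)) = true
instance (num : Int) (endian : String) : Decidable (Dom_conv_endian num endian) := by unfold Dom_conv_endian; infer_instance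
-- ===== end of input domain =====

-- B replaces A's '#'-placeholder cell machine by hex-string, pad-to-even, chunk-by-2 (objective: simpler).

-- ===== PORT A =====
-- HEX_MAP_TO_STR[r]: r is always 'abs_num % 16' < 16, so the dict lookup never raises;
-- the default branch '0' is unreachable.
def aHexMap (r : Nat) : Char :=
  match r with
  | 0 => '0' | 1 => '1' | 2 => '2' | 3 => '3' | 4 => '4' | 5 => '5' | 6 => '6' | 7 => '7'
  | 8 => '8' | 9 => '9' | 10 => 'A' | 11 => 'B' | 12 => 'C' | 13 => 'D' | 14 => 'E' | 15 => 'F'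
  | _ => '0'

-- the while loop; cells (2-char Python strings) are kept as List Char ('join' rebuilds the String).
-- abs_num ≥ 0 always, so Python's % and // on it coincide with Nat's.
def aLoop (absNum : Nat) (res : List (List Char)) : List (List Char) :=
  if h : absNum > 0 then
    let remainder := absNum % 16
    let absNum' := absNum / 16
    let res' :=
      match res with
      | (x :: y :: t) :: rest =>
        if y = '#' then (['#', aHexMap remainder]) :: rest            -- res[0] = "#" + HEX[...]
        else if x = '#' then ([aHexMap remainder, y]) :: rest          -- res[0] = HEX[...] + res[0][1]
        else (['#', aHexMap remainder]) :: (x :: y :: t) :: rest       -- insert "##"; res[0] = "#" + HEX[...]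
      | other => other                                                 -- unreachable: cells always have 2 chars
    aLoop absNum' res'
  else res
termination_by absNum
decreasing_by exact Nat.div_lt_self h (by norm_num)

-- 'if res[0][0] == "#": res[0] = "0" + res[0][1]'
def aFix (res : List (List Char)) : List (List Char) :=
  match res with
  | (x :: y :: t) :: rest => if x = '#' then (['0', y]) :: rest else (x :: y :: t) :: rest
  | other => other

def conv_endian (num : Int) (endian : String) : Option String :=
  let res0 := aLoop num.natAbs [['#', '#']]
  let res1 := aFix res0
  if endian ≠ "big" ∧ endian ≠ "little" then none
  else
    let res2 := if endian = "little" then res1.reverse else res1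
    let s := List.intercalate [' '] res2                               -- " ".join(res)
    let s' := if num < 0 then '-' :: s else s
    if num = 0 then some "00" else some (String.ofList s')

-- ===== PORT B =====
-- format(abs(num), 'X'): standard MSB-first hex recursion; B only calls it with num ≠ 0,
-- so the n = 0 case is unreachable.
def bHexStr (n : Nat) : List Char :=
  if _h : n = 0 then []
  else bHexStr (n / 16) ++ [aHexMap (n % 16)]
termination_by n
decreasing_by exact Nat.div_lt_self (by omega) (by norm_num)

-- [h[i:i+2] for i in range(0, len(h), 2)]; h has even length so the 1-char case is unreachable
def bChunk2 : List Char → List (List Char)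
  | a :: b :: rest => [a, b] :: bChunk2 rest
  | [a] => [[a]]
  | [] => []

def conv_endian_alt (num : Int) (endian : String) : Option String :=
  if endian ≠ "big" ∧ endian ≠ "little" then none
  else if num = 0 then some "00"
  else
    let h0 := bHexStr num.natAbs
    let h := if h0.length % 2 = 1 then '0' :: h0 else h0
    let groups := bChunk2 h
    let groups := if endian = "little" then groups.reverse else groups
    let s := List.intercalate [' '] groups
    some (String.ofList (if num < 0 then '-' :: s else s))

-- ===== PRECONDITION & SPEC =====
def Spec_conv_endian (num : Int) (endian : String) (out : Option String) : Prop := out = conv_endian_alt num endian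
instance (num : Int) (endian : String) (out : Option String) : Decidable (Spec_conv_endian num endian out) := by unfold Spec_conv_endian; infer_instance

-- ===== CLAIM (what is proved, stated in full; the proofs are below) =====
def Claim_equal_conv_endian : Prop := ∀ (num : Int) (endian : String), Dom_conv_endian num endian → Spec_conv_endian num endian (conv_endian num endian)

-- ===== LEMMAS AND PROOFS =====

-- canonical big-endian byte-group list, defined by LSB recursion
def bytesLSB (n : Nat) : List (List Char) :=
  if _h : n = 0 then []
  else if n < 16 then [['0', aHexMap n]]
  else bytesLSB (n / 256) ++ [[aHexMap (n / 16 % 16), aHexMap (n % 16)]]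
termination_by n
decreasing_by exact Nat.div_lt_self (by omega) (by norm_num)

theorem aHexMap_ne_hash (r : Nat) : aHexMap r ≠ '#' := by
  unfold aHexMap; split <;> decide

theorem aLoop_swap (k : Nat) (x y : Char) (t : List Char) (rest : List (List Char))
    (hk : 0 < k) (hx : x ≠ '#') (hy : y ≠ '#') :
    aLoop k ((x :: y :: t) :: rest) = aLoop k (['#', '#'] :: (x :: y :: t) :: rest) := by
  rw [aLoop]; conv_rhs => rw [aLoop]
  simp [hk, hx, hy]

theorem aLoop_fix (n : Nat) (rest : List (List Char)) (hn : 0 < n) :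
    aFix (aLoop n (['#', '#'] :: rest)) = bytesLSB n ++ rest := by
  induction n using Nat.strong_induction_on generalizing rest with
  | _ n ih =>
    rw [aLoop]
    simp only [hn, if_pos, dif_pos]
    by_cases h16 : n < 16
    · have : n / 16 = 0 := Nat.div_eq_of_lt h16
      have : aLoop (n / 16) (['#', aHexMap (n % 16)] :: rest) = ['#', aHexMap (n % 16)] :: rest := by
        rw [aLoop]; simp [this]
      simp only [this]
      rw [aFix, bytesLSB]
      have : n % 16 = n := Nat.mod_eq_of_lt h16
      simp [hn.ne', h16, this]
    · -- n ≥ 16: second step consumes (n/16) % 16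
      have h16' : 0 < n / 16 := Nat.div_pos (by omega) (by norm_num)
      rw [aLoop]
      simp only [h16', if_pos, dif_pos]
      have hne := aHexMap_ne_hash (n % 16)
      simp [hne]
      have hdiv : n / 16 / 16 = n / 256 := by omega
      by_cases h256 : n / 256 = 0
      · rw [hdiv, h256, aLoop]
        simp only [gt_iff_lt, Nat.lt_irrefl, dite_false]
        rw [aFix, bytesLSB]
        simp [aHexMap_ne_hash, hn.ne', h16, h256, bytesLSB]
      · rw [hdiv,
          aLoop_swap _ _ _ _ _ (Nat.pos_of_ne_zero h256) (aHexMap_ne_hash _) (aHexMap_ne_hash _),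
          ih (n / 256) (by omega) _ (Nat.pos_of_ne_zero h256)]
        conv_rhs => rw [bytesLSB]
        simp [hn.ne', h16]

theorem bHexStr_two (n : Nat) (h16 : 16 ≤ n) :
    bHexStr n = bHexStr (n / 256) ++ [aHexMap (n / 16 % 16), aHexMap (n % 16)] := by
  rw [bHexStr]
  simp only [show n ≠ 0 by omega, dite_false]
  rw [bHexStr]
  have : n / 16 ≠ 0 := by
    intro h; have := Nat.div_pos h16 (by norm_num); omega
  simp only [this, dite_false]
  rw [show n / 16 / 16 = n / 256 by omega, List.append_assoc]
  rfl

theorem bChunk2_append (l : List Char) (a b : Char) (h : l.length % 2 = 0) :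
    bChunk2 (l ++ [a, b]) = bChunk2 l ++ [[a, b]] := by
  induction l using bChunk2.induct with
  | case1 x y rest ih =>
    simp only [List.cons_append, bChunk2]
    rw [ih (by simp at h; omega)]
  | case2 x => simp at h
  | case3 => rfl

-- helper: padded hex string, as B computes it
def bPad (l : List Char) : List Char := if l.length % 2 = 1 then '0' :: l else l

theorem bPad_even (l : List Char) : (bPad l).length % 2 = 0 := by
  unfold bPad; split
  · next h => simp; omega
  · next h => omega

theorem bPad_append_two (l : List Char) (a b : Char) :
    bPad (l ++ [a, b]) = bPad l ++ [a, b] := by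
  unfold bPad
  by_cases h : l.length % 2 = 1 <;>
    simp [h, List.length_append]

theorem b_chunks (n : Nat) (hn : 0 < n) :
    bChunk2 (bPad (bHexStr n)) = bytesLSB n := by
  induction n using Nat.strong_induction_on with
  | _ n ih =>
    by_cases h16 : n < 16
    · rw [bHexStr]
      simp only [hn.ne', dite_false]
      rw [bHexStr]
      simp only [Nat.div_eq_of_lt h16, dite_true, List.nil_append]
      rw [bytesLSB]
      simp [hn.ne', h16, bPad, bChunk2, Nat.mod_eq_of_lt h16]
    · rw [bHexStr_two n (by omega), bPad_append_two,
        bChunk2_append _ _ _ (bPad_even _), bytesLSB]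
      simp only [hn.ne', if_false, h16, if_false]
      by_cases h256 : n / 256 = 0
      · rw [h256]
        rw [show bHexStr 0 = [] from by rw [bHexStr]; simp]
        rw [show bytesLSB 0 = [] from by rw [bytesLSB]; simp]
        rfl
      · rw [ih (n / 256) (by omega) (Nat.pos_of_ne_zero h256)]
        simp

-- the two byte-group lists agree for every positive magnitude
theorem groups_eq (n : Nat) (hn : 0 < n) :
    aFix (aLoop n [['#', '#']]) = bChunk2 (bPad (bHexStr n)) := by
  rw [aLoop_fix n [] hn, b_chunks n hn, List.append_nil]

-- ===== VERDICT (by name: the statement is the Claim_ definition above) =====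
theorem conv_endian_spec : Claim_equal_conv_endian := by
  intro num endian _
  show conv_endian num endian = conv_endian_alt num endian
  unfold conv_endian conv_endian_alt
  by_cases hval : endian ≠ "big" ∧ endian ≠ "little"
  · simp [hval]
  · by_cases h0 : num = 0
    · simp [hval, h0]
    · have hpos : 0 < num.natAbs := Int.natAbs_pos.mpr h0
      simp only [hval, if_false, h0, if_false]
      rw [groups_eq num.natAbs hpos]
      simp [bPad]
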